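-- pv_equiv track=rewrite | github.com/macrespo42/mini.showcase | src/block_markdown.py | is_unordered_list
-- ===== SOURCE A (Python) =====
-- def is_unordered_list(block: str) -> bool:
--     if len(block) == 0:
--         return False
--     lines = block.split("\n")
--     for line in lines:
--         if len(line) < 2:
--             return False
--         if not (line[0:2] == "* " or line[0:2] == "- "):
--             return False
--     return True
-- ===== SOURCE B (Python) =====
-- def is_unordered_list(block: str) -> bool:
--     # Single character-level scan (small state machine), no split and no per-line slicing.
--     if not block:
--         return False
--     state = 0  # 0: expecting a bullet at line start, 1: expecting the space after it, 2: inside line content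
--     for ch in block:
--         if state == 0:
--             if ch == '-' or ch == '*':
--                 state = 1
--             else:
--                 return False
--         elif state == 1:
--             if ch == ' ':
--                 state = 2
--             else:
--                 return False
--         elif ch == '\n':
--             state = 0
--     return state == 2
-- ===== Notes on version B (the rewrite author's own statement) =====
-- stated objective: alternative
-- what changed: Replaced split-into-lines plus per-line length/prefix slicing with a single character-level state machine that scans the block once with no intermediate line list.
import Mathlib
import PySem

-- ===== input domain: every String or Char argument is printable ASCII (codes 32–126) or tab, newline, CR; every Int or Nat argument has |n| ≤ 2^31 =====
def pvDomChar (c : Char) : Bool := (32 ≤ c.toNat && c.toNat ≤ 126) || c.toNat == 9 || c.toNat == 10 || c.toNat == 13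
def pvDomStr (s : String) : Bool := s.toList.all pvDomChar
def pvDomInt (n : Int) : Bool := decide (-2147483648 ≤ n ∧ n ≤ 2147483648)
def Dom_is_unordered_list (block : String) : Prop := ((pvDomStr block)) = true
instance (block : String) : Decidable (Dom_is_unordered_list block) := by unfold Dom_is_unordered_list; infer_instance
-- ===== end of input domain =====

-- B replaces A's split-into-lines + per-line slicing with a single character-level
-- state machine over the block (alternative decomposition, same O(n) cost).

-- ===== PORT A =====
-- the for-loop over lines, with A's early returns
def isUnorderedLoopA : List (List Char) → Bool
  | [] => true
  | line :: rest =>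
    if line.length < 2 then false
    else if !(PySem.List.slice line (some 0) (some 2) == ['*', ' '] ||
              PySem.List.slice line (some 0) (some 2) == ['-', ' ']) then false
    else isUnorderedLoopA rest

def is_unordered_list (block : String) : Bool :=
  if PySem.Str.len block = 0 then false
  else isUnorderedLoopA (PySem.Chars.splitOn block.toList ['\n'])

-- ===== PORT B =====
-- B's for-loop over characters with the state variable (0/1/2) and early returns
def isUnorderedScanB : Nat → List Char → Bool
  | st, [] => st == 2
  | st, c :: cs =>
    if st = 0 then
      if c = '-' ∨ c = '*' then isUnorderedScanB 1 cs else false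
    else if st = 1 then
      if c = ' ' then isUnorderedScanB 2 cs else false
    else
      isUnorderedScanB (if c = '\n' then 0 else st) cs

def is_unordered_list_alt (block : String) : Bool :=
  if block.toList.isEmpty then false
  else isUnorderedScanB 0 block.toList

-- ===== PRECONDITION & SPEC =====
def Spec_is_unordered_list (block : String) (out : Bool) : Prop := out = is_unordered_list_alt block
instance (block : String) (out : Bool) : Decidable (Spec_is_unordered_list block out) := by unfold Spec_is_unordered_list; infer_instance

-- ===== CLAIM (what is proved, stated in full; the proofs are below) =====
def Claim_equal_is_unordered_list : Prop := ∀ (block : String), Dom_is_unordered_list block → Spec_is_unordered_list block (is_unordered_list block)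

-- ===== LEMMAS AND PROOFS =====

-- reference line-splitter for a single-character separator
def pvLines (sep : Char) : List Char → List (List Char)
  | [] => [[]]
  | d :: ds =>
    if d = sep then [] :: pvLines sep ds
    else
      match pvLines sep ds with
      | l :: ls => (d :: l) :: ls
      | [] => [[d]]

theorem pvLines_ne_nil (sep : Char) (cs : List Char) : pvLines sep cs ≠ [] := by
  induction cs with
  | nil => simp [pvLines]
  | cons d ds ih =>
    simp only [pvLines]
    split
    · simp
    · cases h : pvLines sep ds with
      | nil => simp
      | cons l ls => simp

-- PySem's fuel-based splitOn.go, for a one-character separator, computes pvLines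
theorem splitOn_go_single (sep : Char) :
    ∀ (fuel : Nat) (l cur : List Char) (acc : List (List Char)), l.length ≤ fuel →
      PySem.Chars.splitOn.go [sep] fuel l cur acc =
        acc.reverse ++ (pvLines sep l).modifyHead (cur.reverse ++ ·) := by
  intro fuel
  induction fuel with
  | zero =>
    intro l cur acc hl
    have : l = [] := List.length_eq_zero_iff.mp (Nat.le_zero.mp hl)
    subst this
    simp [PySem.Chars.splitOn.go, pvLines]
  | succ n ih =>
    intro l cur acc hl
    cases l with
    | nil => simp [PySem.Chars.splitOn.go, pvLines]
    | cons c rest =>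
      rw [PySem.Chars.splitOn.go]
      by_cases hc : c = sep
      · subst hc
        have hpre : [c].isPrefixOf (c :: rest) = true := by
          simp [List.isPrefixOf]
        simp only [hpre, if_pos]
        rw [ih _ _ _ (by simpa using Nat.le_of_succ_le_succ hl)]
        have hid : ∀ (xs : List (List Char)), List.modifyHead (fun x => x) xs = xs := by
          intro xs; cases xs <;> simp
        simp [pvLines, hid]
      · have hpre : [sep].isPrefixOf (c :: rest) = false := by
          simp [List.isPrefixOf, Ne.symm hc]
        simp only [hpre, Bool.false_eq_true, if_false]
        rw [ih _ _ _ (by simpa using Nat.le_of_succ_le_succ hl)]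
        simp only [pvLines, hc, if_false]
        cases h : pvLines sep rest with
        | nil => exact absurd h (pvLines_ne_nil sep rest)
        | cons l ls => simp

theorem splitOn_single (sep : Char) (cs : List Char) :
    PySem.Chars.splitOn cs [sep] = pvLines sep cs := by
  unfold PySem.Chars.splitOn
  rw [splitOn_go_single sep (cs.length + 1) cs [] [] (by omega)]
  cases h : pvLines sep cs with
  | nil => exact absurd h (pvLines_ne_nil sep cs)
  | cons l ls => simp

-- the per-line test A's loop applies
def pvGood (l : List Char) : Bool :=
  !(l.length < 2) && (l.take 2 == ['*', ' '] || l.take 2 == ['-', ' '])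

theorem loopA_eq_all (ls : List (List Char)) : isUnorderedLoopA ls = ls.all pvGood := by
  induction ls with
  | nil => rfl
  | cons l rest ih =>
    simp only [isUnorderedLoopA, List.all_cons, pvGood]
    have h2 : PySem.List.slice l (some 0) (some 2) = l.take 2 := by
      rw [PySem.List.slice_zero_start]
      simpa using PySem.List.slice_to_natCast l 2
    rw [h2]
    by_cases h1 : l.length < 2
    · simp [h1]
    · cases hp : (l.take 2 == ['*', ' '] || l.take 2 == ['-', ' ']) <;>
        simp [h1, hp, ih]

-- the state machine, characterised line-by-line (states 0 and 2 simultaneously)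
theorem scanB_char : ∀ (n : Nat) (cs : List Char), cs.length ≤ n →
    isUnorderedScanB 0 cs = (pvLines '\n' cs).all pvGood ∧
    isUnorderedScanB 2 cs = ((pvLines '\n' cs).tail.all pvGood) := by
  intro n
  induction n with
  | zero =>
    intro cs h
    have : cs = [] := List.length_eq_zero_iff.mp (Nat.le_zero.mp h)
    subst this
    simp [isUnorderedScanB, pvLines, pvGood]
  | succ n ih =>
    intro cs hlen
    cases cs with
    | nil => simp [isUnorderedScanB, pvLines, pvGood]
    | cons c cs' =>
      have hcs' : cs'.length ≤ n := by simpa using Nat.le_of_succ_le_succ hlen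
      constructor
      · -- state 0
        by_cases hb : c = '-' ∨ c = '*'
        · have hnl : c ≠ '\n' := by rcases hb with h | h <;> subst h <;> decide
          simp only [isUnorderedScanB, if_pos rfl, if_pos hb]
          cases cs' with
          | nil =>
            have : (1 == 2) = false := by decide
            simp only [isUnorderedScanB, this, pvLines, hnl, if_false, pvGood]
            rcases hb with h | h <;> subst h <;> decide
          | cons d cs'' =>
            have hd2 : cs''.length ≤ n := by
              have := hcs'; simp at this; omega
            by_cases hsp : d = ' '
            · subst hsp
              have h1 : (1 : Nat) ≠ 0 := by decide
              simp only [isUnorderedScanB, h1, if_false, if_pos rfl]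
              rw [(ih cs'' hd2).2]
              have hdnl : (' ' : Char) ≠ '\n' := by decide
              simp only [pvLines, hnl, if_false, hdnl]
              cases h : pvLines '\n' cs'' with
              | nil => exact absurd h (pvLines_ne_nil _ _)
              | cons l ls =>
                have hg : pvGood (c :: ' ' :: l) = true := by
                  rcases hb with hbc | hbc <;> subst hbc <;>
                    simp [pvGood, List.take]
                simp [hg]
            · have h1 : (1 : Nat) ≠ 0 := by decide
              simp only [isUnorderedScanB, h1, if_false, if_pos rfl, if_neg hsp]
              by_cases hdnl : d = '\n'
              · subst hdnl
                simp only [pvLines, hnl, if_false, if_pos rfl]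
                have : pvGood [c] = false := by simp [pvGood]
                simp [this]
              · simp only [pvLines, hnl, if_false, hdnl]
                cases h : pvLines '\n' cs'' with
                | nil => exact absurd h (pvLines_ne_nil _ _)
                | cons l ls =>
                  have hg : pvGood (c :: d :: l) = false := by
                    simp [pvGood, List.take]
                    exact ⟨fun _ => hsp, fun _ => hsp⟩
                  simp [hg]
        · simp only [isUnorderedScanB, if_pos rfl, if_neg hb]
          push_neg at hb
          by_cases hnl : c = '\n'
          · subst hnl
            simp only [pvLines, if_pos rfl]
            have : pvGood [] = false := by decide
            simp [this]
          · simp only [pvLines, hnl, if_false]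
            cases h : pvLines '\n' cs' with
            | nil => exact absurd h (pvLines_ne_nil _ _)
            | cons l ls =>
              have hg : pvGood (c :: l) = false := by
                simp only [pvGood]
                rw [Bool.and_eq_false_iff]
                right
                rw [Bool.or_eq_false_iff]
                constructor <;>
                  · rw [beq_eq_false_iff_ne]
                    cases l <;> simp [List.take, hb.1, hb.2]
              simp [hg]
      · -- state 2
        have h20 : (2 : Nat) ≠ 0 := by decide
        have h21 : (2 : Nat) ≠ 1 := by decide
        by_cases hnl : c = '\n'
        · subst hnl
          rw [show isUnorderedScanB 2 ('\n' :: cs') = isUnorderedScanB 0 cs' from by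
            simp [isUnorderedScanB]]
          rw [(ih cs' hcs').1]
          simp [pvLines]
        · simp only [isUnorderedScanB, h20, h21, if_false, if_neg hnl]
          rw [(ih cs' hcs').2]
          simp only [pvLines, hnl, if_false]
          cases h : pvLines '\n' cs' with
          | nil => exact absurd h (pvLines_ne_nil _ _)
          | cons l ls => simp

-- ===== VERDICT (by name: the statement is the Claim_ definition above) =====
theorem is_unordered_list_spec : Claim_equal_is_unordered_list := by
  intro block _
  unfold Spec_is_unordered_list is_unordered_list is_unordered_list_alt
  by_cases h : block.toList = []
  · simp [PySem.Str.len, PySem.Chars.len, h]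
  · have hlen : PySem.Str.len block ≠ 0 := by
      have hb : block ≠ "" := fun h' => h (by rw [h']; rfl)
      simpa [PySem.Str.len] using hb
    have hne : block.toList.isEmpty = false := by simpa [List.isEmpty_iff] using h
    simp only [hlen, if_false, hne, Bool.false_eq_true]
    rw [loopA_eq_all, splitOn_single, (scanB_char block.toList.length block.toList le_rfl).1]
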